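-- pv_equiv track=rewrite | github.com/JBRS307/WDI | list3/zad19.py | count_length_of_substr
-- ===== SOURCE A (Python) =====
-- def count_length_of_substr(arr, n):
--     index_sum = 0
--     elem_sum = arr[0]
--     max_leng = 0
--
--     leng = 1
--     for i in range(1, n):
--         if arr[i] > arr[i-1]:
--             leng += 1
--             index_sum += i
--             elem_sum += arr[i]
--         else:
--             if elem_sum == index_sum:
--                 max_leng = max(max_leng, leng)
--
--             leng = 1
--             elem_sum = arr[i]
--             index_sum = i
--
--     if elem_sum == index_sum:
--         max_leng = max(max_leng, leng)
--
--     return max_leng if max_leng >= 2 else 0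
-- ===== SOURCE B (Python) =====
-- def count_length_of_substr(arr, n):
--     # pass 1: collect the maximal strictly-increasing runs of arr[:n] as (start, end) index pairs
--     runs = []
--     s = 0
--     for i in range(1, n):
--         if arr[i] <= arr[i - 1]:
--             runs.append((s, i - 1))
--             s = i
--     runs.append((s, n - 1))
--     # pass 2: a run qualifies when its element sum equals the closed-form sum of its indices
--     best = 0
--     for s, e in runs:
--         if sum(arr[s:e + 1]) == (s + e) * (e - s + 1) // 2:
--             best = max(best, e - s + 1)
--     return best if best >= 2 else 0
-- ===== Notes on version B (the rewrite author's own statement) =====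
-- stated objective: alternative
-- what changed: A tracks running index/element sums and a max in one fused loop; B first collects the maximal strictly-increasing runs as (start,end) pairs, then scores each run in a second pass by comparing its slice sum with the closed-form index sum (s+e)*(e-s+1)//2; Pre_ excludes only the inputs where A raises IndexError (empty arr, or n > len(arr)).
import Mathlib
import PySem

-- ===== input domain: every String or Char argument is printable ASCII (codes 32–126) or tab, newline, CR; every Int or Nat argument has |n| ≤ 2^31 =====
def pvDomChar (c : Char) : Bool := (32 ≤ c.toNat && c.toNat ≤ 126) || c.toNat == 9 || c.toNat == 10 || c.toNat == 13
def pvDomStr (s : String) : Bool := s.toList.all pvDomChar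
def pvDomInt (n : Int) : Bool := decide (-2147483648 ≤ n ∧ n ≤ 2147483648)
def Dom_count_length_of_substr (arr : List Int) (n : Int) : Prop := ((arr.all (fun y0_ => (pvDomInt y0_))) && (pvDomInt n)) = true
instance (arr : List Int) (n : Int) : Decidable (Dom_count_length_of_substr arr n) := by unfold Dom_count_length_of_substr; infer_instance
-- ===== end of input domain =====

-- B rewrites A's one-pass running-sums loop as two passes — collect the maximal strictly-increasing
-- runs, then score each run by a slice sum against the closed-form index sum ("alternative", same cost).

-- ===== PORT A =====
-- body of A's for-loop; state = (index_sum, elem_sum, max_leng, leng)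
def stepA (arr : List Int) (st : Int × Int × Int × Int) (i : Int) : Int × Int × Int × Int :=
  if PySem.List.pyGetD arr i 0 > PySem.List.pyGetD arr (i - 1) 0 then
    (st.1 + i, st.2.1 + PySem.List.pyGetD arr i 0, st.2.2.1, st.2.2.2 + 1)
  else
    (i, PySem.List.pyGetD arr i 0,
     if st.2.1 = st.1 then max st.2.2.1 st.2.2.2 else st.2.2.1, 1)

-- A's for-loop over range(1, n)
def loopA (arr : List Int) (n : Int) : Int × Int × Int × Int :=
  (PySem.List.pyRange 1 n 1).foldl (stepA arr) (0, PySem.List.pyGetD arr 0 0, 0, 1)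

def count_length_of_substr (arr : List Int) (n : Int) : Int :=
  let st := loopA arr n
  let max_leng := if st.2.1 = st.1 then max st.2.2.1 st.2.2.2 else st.2.2.1
  if max_leng ≥ 2 then max_leng else 0

-- ===== PORT B =====
-- body of B's first pass; state = (runs collected so far, start of the current run)
def stepB1 (arr : List Int) (p : List (Int × Int) × Int) (i : Int) : List (Int × Int) × Int :=
  if PySem.List.pyGetD arr i 0 ≤ PySem.List.pyGetD arr (i - 1) 0 then
    (p.1 ++ [(p.2, i - 1)], i)
  else p

-- B's first pass over range(1, n)
def loopB1 (arr : List Int) (n : Int) : List (Int × Int) × Int :=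
  (PySem.List.pyRange 1 n 1).foldl (stepB1 arr) ([], 0)

-- body of B's second pass: score one run (s, e)
def stepB2 (arr : List Int) (best : Int) (se : Int × Int) : Int :=
  if (PySem.List.slice arr (some se.1) (some (se.2 + 1))).sum
       = PySem.Int.floordiv ((se.1 + se.2) * (se.2 - se.1 + 1)) 2 then
    max best (se.2 - se.1 + 1)
  else best

def count_length_of_substr_alt (arr : List Int) (n : Int) : Int :=
  let p := loopB1 arr n
  let best := (p.1 ++ [(p.2, n - 1)]).foldl (stepB2 arr) 0
  if best ≥ 2 then best else 0

-- ===== PRECONDITION & SPEC =====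
-- Pre_ excludes exactly the inputs on which A raises IndexError: the empty list (arr[0])
-- and n > len(arr) with n ≥ 2 (the loop then reads arr[len(arr)]); n ≤ 1 never indexes past 0.
def Pre_count_length_of_substr (arr : List Int) (n : Int) : Prop :=
  arr ≠ [] ∧ n ≤ arr.length
instance (arr : List Int) (n : Int) : Decidable (Pre_count_length_of_substr arr n) := by
  unfold Pre_count_length_of_substr; infer_instance

def pvWitness_count_length_of_substr : List Int × Int := ([5, 0, 2, 3, 1], 5)

def Spec_count_length_of_substr (arr : List Int) (n : Int) (out : Int) : Prop := out = count_length_of_substr_alt arr n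
instance (arr : List Int) (n : Int) (out : Int) : Decidable (Spec_count_length_of_substr arr n out) := by unfold Spec_count_length_of_substr; infer_instance

-- ===== CLAIM (what is proved, stated in full; the proofs are below) =====
def Claim_equal_count_length_of_substr : Prop := ∀ (arr : List Int) (n : Int), Dom_count_length_of_substr arr n → Pre_count_length_of_substr arr n → Spec_count_length_of_substr arr n (count_length_of_substr arr n)

-- ===== LEMMAS AND PROOFS =====

-- sum of arr[s:k+1] = sum of arr[s:k] + arr[k]
lemma sliceSum_succ (arr : List Int) (s k : Int) (h0 : 0 ≤ s) (hsk : s ≤ k)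
    (hk : k < (arr.length : Int)) :
    (PySem.List.slice arr (some s) (some (k + 1))).sum
      = (PySem.List.slice arr (some s) (some k)).sum + PySem.List.pyGetD arr k 0 := by
  rw [PySem.List.slice_toNat arr h0 (by omega), PySem.List.slice_toNat arr h0 (by omega)]
  have h1 : (k + 1).toNat - s.toNat = (k.toNat - s.toNat) + 1 := by omega
  have h2 : s.toNat + (k.toNat - s.toNat) = k.toNat := by omega
  have hk' : k.toNat < arr.length := by omega
  rw [h1, List.take_add_one, List.getElem?_drop, h2, List.getElem?_eq_getElem hk',
    PySem.List.pyGetD_eq_getElem arr 0 (by omega) hk]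
  simp

-- the one-element slice arr[k:k+1] sums to arr[k]
lemma sliceSum_single (arr : List Int) (k : Int) (h0 : 0 ≤ k) (hk : k < (arr.length : Int)) :
    (PySem.List.slice arr (some k) (some (k + 1))).sum = PySem.List.pyGetD arr k 0 := by
  have := sliceSum_succ arr k k h0 le_rfl hk
  rw [this, PySem.List.slice_toNat arr h0 h0]
  simp

-- scoring the run [s, k-1] whose sums are known: B's stepB2 computes A's conditional max
lemma score_run (arr : List Int) (isum esum ml s k : Int)
    (hisum : 2 * isum = (s + (k - 1)) * (k - s))
    (hesum : esum = (PySem.List.slice arr (some s) (some k)).sum) :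
    stepB2 arr ml (s, k - 1) = if esum = isum then max ml (k - s) else ml := by
  unfold stepB2
  have h1 : (s + (k - 1)) * (k - 1 - s + 1) = 2 * isum := by rw [hisum]; ring
  have h2 : PySem.Int.floordiv ((s + (k - 1)) * (k - 1 - s + 1)) 2 = isum := by
    rw [h1, PySem.Int.floordiv_eq_ediv_of_pos (by norm_num)]
    omega
  simp only [h2]
  have h3 : k - 1 + 1 = k := by ring
  rw [h3, ← hesum]
  by_cases hc : esum = isum
  · simp [hc, max_def]; omega
  · simp [hc]

-- the joint loop invariant after processing indices 1 .. j (k = 1 + j):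
-- B's current-run start s delimits the run, A's running sums are the slice sum of arr[s:k]
-- and the closed-form index sum of s..k-1, and A's max_leng is B's score of the runs so far
lemma inv (arr : List Int) (hne : arr ≠ []) (j : Nat) (hj : (1 : Int) + j ≤ arr.length) :
    0 ≤ (loopB1 arr (1 + j)).2 ∧ (loopB1 arr (1 + j)).2 < 1 + j ∧
    (loopA arr (1 + j)).2.2.2 = 1 + j - (loopB1 arr (1 + j)).2 ∧
    2 * (loopA arr (1 + j)).1 = ((loopB1 arr (1 + j)).2 + (1 + j - 1)) * (1 + j - (loopB1 arr (1 + j)).2) ∧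
    (loopA arr (1 + j)).2.1 = (PySem.List.slice arr (some (loopB1 arr (1 + j)).2) (some (1 + j))).sum ∧
    (loopA arr (1 + j)).2.2.1 = (loopB1 arr (1 + j)).1.foldl (stepB2 arr) 0 := by
  have hlen : 1 ≤ (arr.length : Int) := by
    have : arr.length ≠ 0 := by simpa [List.length_eq_zero_iff] using hne
    omega
  induction j with
  | zero =>
    have hr : PySem.List.pyRange 1 (1 + (0:Nat)) 1 = [] := by
      norm_num [PySem.List.pyRange_one]
    have hs := sliceSum_single arr 0 le_rfl (by omega)
    simp [loopA, loopB1]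
    simpa using hs.symm
  | succ j ih =>
    have hj' : (1 : Int) + j ≤ arr.length := by push_cast at hj ⊢; omega
    obtain ⟨ih1, ih2, ih3, ih4, ih5, ih6⟩ := ih hj'
    have hk : (1 : Int) + (j + 1 : Nat) = (1 + j) + 1 := by push_cast; ring
    have hr : PySem.List.pyRange 1 ((1 + (j:Int)) + 1) 1
        = PySem.List.pyRange 1 (1 + (j:Int)) 1 ++ [1 + (j:Int)] := by
      exact PySem.List.pyRange_one_succ_right (by omega)
    have ha : loopA arr (1 + (j + 1 : Nat)) = stepA arr (loopA arr (1 + j)) (1 + j) := by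
      rw [loopA, hk, hr, List.foldl_append]; rfl
    have hb : loopB1 arr (1 + (j + 1 : Nat)) = stepB1 arr (loopB1 arr (1 + j)) (1 + j) := by
      rw [loopB1, hk, hr, List.foldl_append]; rfl
    set k : Int := 1 + (j : Int) with hkdef
    have hklen : k < (arr.length : Int) := by push_cast at hj; omega
    rw [ha, hb, hk]
    by_cases hc : PySem.List.pyGetD arr k 0 ≤ PySem.List.pyGetD arr (k - 1) 0
    · -- arr[k] ≤ arr[k-1]: the run breaks; A flushes, B appends the run (s, k-1)
      have hA : stepA arr (loopA arr k) k
          = (k, PySem.List.pyGetD arr k 0,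
             if (loopA arr k).2.1 = (loopA arr k).1 then
               max (loopA arr k).2.2.1 (loopA arr k).2.2.2 else (loopA arr k).2.2.1, 1) := by
        unfold stepA; rw [if_neg (by omega)]
      have hB : stepB1 arr (loopB1 arr k) k = ((loopB1 arr k).1 ++ [((loopB1 arr k).2, k - 1)], k) := by
        unfold stepB1; rw [if_pos hc]
      rw [hA, hB]
      dsimp only
      refine ⟨by omega, by omega, by omega, by ring_nf, ?_, ?_⟩
      · simpa using (sliceSum_single arr k (by omega) hklen).symm
      · rw [List.foldl_append]
        simp only [List.foldl_cons, List.foldl_nil]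
        rw [← ih6, score_run arr (loopA arr k).1 (loopA arr k).2.1 _ (loopB1 arr k).2 k (by omega) ih5]
        rw [ih3]
    · -- arr[k] > arr[k-1]: the run extends; B's state is unchanged
      have hA : stepA arr (loopA arr k) k
          = ((loopA arr k).1 + k, (loopA arr k).2.1 + PySem.List.pyGetD arr k 0,
             (loopA arr k).2.2.1, (loopA arr k).2.2.2 + 1) := by
        unfold stepA; rw [if_pos (by omega)]
      have hB : stepB1 arr (loopB1 arr k) k = loopB1 arr k := by
        unfold stepB1; rw [if_neg (by omega)]
      rw [hA, hB]
      dsimp only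
      refine ⟨ih1, by omega, by omega, by nlinarith [ih4], ?_, ih6⟩
      rw [sliceSum_succ arr (loopB1 arr k).2 k ih1 (by omega) hklen, ih5]

-- ===== VERDICT (by name: the statement is the Claim_ definition above) =====
theorem count_length_of_substr_spec : Claim_equal_count_length_of_substr := by
  intro arr n _ hpre
  obtain ⟨hne, hn_le⟩ := hpre
  have hlen : 1 ≤ (arr.length : Int) := by
    have : arr.length ≠ 0 := by simpa [List.length_eq_zero_iff] using hne
    omega
  unfold Spec_count_length_of_substr count_length_of_substr count_length_of_substr_alt
  dsimp only
  by_cases hn : n > 1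
  · -- the loops run over the same range(1, n); flush the final run with score_run
    have hj := inv arr hne (n - 1).toNat (by omega)
    have hcast : (1 : Int) + ((n - 1).toNat : Int) = n := by omega
    rw [hcast] at hj
    obtain ⟨h1, h2, h3, h4, h5, h6⟩ := hj
    rw [List.foldl_append]
    simp only [List.foldl_cons, List.foldl_nil]
    rw [← h6, score_run arr (loopA arr n).1 (loopA arr n).2.1 _ (loopB1 arr n).2 n h4 h5, ← h3]
  · -- n ≤ 1: both ranges are empty; A's max_leng is at most 1 and B's single run
    -- (0, n-1) has length n ≤ 1, so both sides fall to 0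
    have hrA : PySem.List.pyRange 1 n 1 = [] := by
      rw [PySem.List.pyRange_one]
      have : (n - 1).toNat = 0 := by omega
      simp [this]
    simp only [loopA, loopB1, hrA, List.foldl_nil, List.nil_append, List.foldl_cons]
    -- A's side: max_leng = if arr[0] = 0 then 1 else 0, never ≥ 2
    have hAle : (if PySem.List.pyGetD arr 0 0 = 0 then max 0 1 else (0:Int)) ≤ 1 := by
      split_ifs <;> omega
    -- B's side: best = stepB2 0 (0, n-1) ≤ max 0 n ≤ 1
    have hBle : stepB2 arr 0 (0, n - 1) ≤ 1 := by
      unfold stepB2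
      dsimp only
      split_ifs <;> omega
    rw [if_neg (by omega), if_neg (by omega)]
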